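-- pv_equiv track=rewrite | github.com/miliar/Code_Jam_Webscraper | solutions_python/solutions_year16_round0_nr2/789.py | fingConsPos
-- ===== SOURCE A (Python) =====
-- def fingConsPos(myStr):
--     consPos = -1
--     consRec = 0
--     consBig = 0
--     on = False;
--     for i in range(0, len(myStr)):
--         if myStr[i] == '+' and on == False:
--             on = True
--             consBig += 1
--         elif myStr[i] == '+' and on == True:
--             consBig += 1
--         elif myStr[i] == '-' and on == True:
--             if consBig > consRec:
--                 consRec = consBig
--                 consPos = i - 1;
--             consBig = 0
--             on = False
--     return consPos
-- ===== SOURCE B (Python) =====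
-- def fingConsPos(myStr):
--     # Split on '-': A's counter accumulates '+' seen since the last '-' (other
--     # characters leave its state untouched), so each part between '-' delimiters
--     # contributes its '+' count; the trailing part (no closing '-') never counts.
--     parts = myStr.split('-')
--     pos, best, idx = -1, 0, 0
--     for part in parts[:-1]:
--         c = part.count('+')
--         if c > best:
--             best, pos = c, idx + len(part) - 1
--         idx += len(part) + 1
--     return pos
-- ===== Notes on version B (the rewrite author's own statement) =====
-- stated objective: faster
-- what changed: Replaced the per-character state machine (flags on/consBig/consRec updated for every index) by split('-') plus part.count('+') over the parts except the last, tracking the best count and the running index; C-level split/count replace the Python-level per-char loop.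
import Mathlib
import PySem

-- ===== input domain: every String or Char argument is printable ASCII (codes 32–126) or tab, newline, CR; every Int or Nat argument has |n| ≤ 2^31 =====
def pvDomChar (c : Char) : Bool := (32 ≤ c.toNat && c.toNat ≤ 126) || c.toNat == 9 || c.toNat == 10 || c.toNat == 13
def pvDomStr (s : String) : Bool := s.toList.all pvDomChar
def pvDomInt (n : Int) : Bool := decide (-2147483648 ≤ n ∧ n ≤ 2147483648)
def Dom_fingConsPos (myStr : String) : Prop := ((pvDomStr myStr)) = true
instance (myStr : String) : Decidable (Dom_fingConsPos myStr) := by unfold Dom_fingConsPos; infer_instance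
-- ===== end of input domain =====

-- B replaces A's per-character state machine by split-on-'-' plus a '+'-count per part (constant-factor speedup in Python).


-- ===== PORT A =====
-- the for-loop over range(len(myStr)) with state (consPos, consRec, consBig, on)
def fingALoop : List Char → Int → Int → Int → Int → Bool → Int
  | [], _, consPos, _, _, _ => consPos
  | c :: rest, i, consPos, consRec, consBig, on =>
    if c = '+' ∧ on = false then
      fingALoop rest (i + 1) consPos consRec (consBig + 1) true
    else if c = '+' ∧ on = true then
      fingALoop rest (i + 1) consPos consRec (consBig + 1) true
    else if c = '-' ∧ on = true then
      if consBig > consRec then fingALoop rest (i + 1) (i - 1) consBig 0 false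
      else fingALoop rest (i + 1) consPos consRec 0 false
    else
      fingALoop rest (i + 1) consPos consRec consBig on

def fingConsPos (myStr : String) : Int :=
  fingALoop myStr.toList 0 (-1) 0 0 false

-- ===== PORT B =====
-- loop body of Source B: state (pos, best, idx); part.count('+') ported as List.count (exact: one-char needle)
def fingBStep (st : Int × Int × Int) (part : List Char) : Int × Int × Int :=
  if ((part.count '+' : Int)) > st.2.1 then
    (st.2.2 + (part.length : Int) - 1, (part.count '+' : Int), st.2.2 + (part.length : Int) + 1)
  else
    (st.1, st.2.1, st.2.2 + (part.length : Int) + 1)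

-- myStr.split('-') ported as List.splitOn '-' (exact for a one-character separator);
-- parts[:-1] ported as dropLast (exact)
def fingConsPos_alt (myStr : String) : Int :=
  (((List.splitOn '-' myStr.toList).dropLast).foldl fingBStep (-1, 0, 0)).1

-- ===== PRECONDITION & SPEC =====
def Spec_fingConsPos (myStr : String) (out : Int) : Prop := out = fingConsPos_alt myStr
instance (myStr : String) (out : Int) : Decidable (Spec_fingConsPos myStr out) := by unfold Spec_fingConsPos; infer_instance

-- ===== CLAIM (what is proved, stated in full; the proofs are below) =====
def Claim_equal_fingConsPos : Prop := ∀ (myStr : String), Dom_fingConsPos myStr → Spec_fingConsPos myStr (fingConsPos myStr)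

-- ===== LEMMAS AND PROOFS =====

-- recursion form of B's fold: bAux parts idx pos best walks the parts except the last
def bAux : List (List Char) → Int → Int → Int → Int
  | [], _, pos, _ => pos
  | [_], _, pos, _ => pos
  | p :: q :: rest, idx, pos, best =>
    if ((p.count '+' : Int)) > best then
      bAux (q :: rest) (idx + (p.length : Int) + 1) (idx + (p.length : Int) - 1) (p.count '+')
    else
      bAux (q :: rest) (idx + (p.length : Int) + 1) pos best

theorem bAux_cons (p : List Char) (rest : List (List Char)) (idx pos best : Int) :
    bAux (p :: rest) idx pos best =
      if rest = [] then pos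
      else if ((p.count '+' : Int)) > best then
        bAux rest (idx + (p.length : Int) + 1) (idx + (p.length : Int) - 1) (p.count '+')
      else bAux rest (idx + (p.length : Int) + 1) pos best := by
  cases rest <;> simp [bAux]

theorem fold_eq_bAux (parts : List (List Char)) :
    ∀ (idx pos best : Int),
      ((parts.dropLast).foldl fingBStep (pos, best, idx)).1 = bAux parts idx pos best := by
  induction parts with
  | nil => intro idx pos best; simp [bAux]
  | cons p rest ih =>
    cases rest with
    | nil => intro idx pos best; simp [bAux]
    | cons q rest' =>
      intro idx pos best
      rw [List.dropLast_cons₂, List.foldl_cons]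
      simp only [bAux]
      by_cases h : ((p.count '+' : Int)) > best
      · rw [if_pos h,
          show fingBStep (pos, best, idx) p
              = (idx + (p.length : Int) - 1, (p.count '+' : Int), idx + (p.length : Int) + 1) by
            simp [fingBStep, h]]
        exact ih _ _ _
      · rw [if_neg h,
          show fingBStep (pos, best, idx) p = (pos, best, idx + (p.length : Int) + 1) by
            simp [fingBStep]; omega]
        exact ih _ _ _

-- main invariant: A's loop from any mid-state equals processing (pending count `big` +
-- first remaining part), then bAux over the remaining parts
theorem fingA_eq_bAux (cs : List Char) :
    ∀ (p : List Char) (rest : List (List Char)) (i pos r big : Int) (on : Bool),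
      List.splitOn '-' cs = p :: rest →
      (on = true ↔ 0 < big) → 0 ≤ big → 0 ≤ r →
      fingALoop cs i pos r big on =
        if rest = [] then pos
        else if big + (p.count '+' : Int) > r then
          bAux rest (i + (p.length : Int) + 1) (i + (p.length : Int) - 1) (big + (p.count '+' : Int))
        else bAux rest (i + (p.length : Int) + 1) pos r := by
  induction cs with
  | nil =>
    intro p rest i pos r big on hsplit hon hbig hr
    simp only [List.splitOn, List.splitOnP_nil, List.cons.injEq] at hsplit
    obtain ⟨hp, hrest⟩ := hsplit
    subst hp; subst hrest
    simp [fingALoop]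
  | cons c cs ih =>
    intro p rest i pos r big on hsplit hon hbig hr
    rw [List.splitOn, List.splitOnP_cons] at hsplit
    obtain ⟨p', rest', hsplit'⟩ :
        ∃ p' rest', List.splitOn '-' cs = p' :: rest' := by
      rcases h : List.splitOn '-' cs with _ | ⟨p', rest'⟩
      · exact absurd h (List.splitOnP_ne_nil _ _)
      · exact ⟨p', rest', rfl⟩
    by_cases hc : c = '-'
    · -- separator: the pending part closes here
      subst hc
      rw [if_pos (by simp)] at hsplit
      rw [List.splitOn] at hsplit'
      rw [hsplit'] at hsplit
      obtain ⟨hp, hrest⟩ := List.cons.inj hsplit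
      subst hp; subst hrest
      cases on with
      | true =>
        have hbigpos : 0 < big := hon.mp rfl
        have hA : fingALoop ('-' :: cs) i pos r big true =
            if big > r then fingALoop cs (i + 1) (i - 1) big 0 false
            else fingALoop cs (i + 1) pos r 0 false := by
          simp [fingALoop]
        rw [hA]
        by_cases hgt : big > r
        · rw [if_pos hgt,
            ih p' rest' (i + 1) (i - 1) big 0 false hsplit' (by simp) le_rfl (le_of_lt hbigpos)]
          simp only [List.count_nil, List.length_nil, List.cons_ne_nil, ite_false, bAux_cons]
          split_ifs <;> first
            | rfl
            | (exfalso; push_cast at *; omega)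
              | (push_cast; ring_nf)
        · rw [if_neg hgt,
            ih p' rest' (i + 1) pos r 0 false hsplit' (by simp) le_rfl hr]
          simp only [List.count_nil, List.length_nil, List.cons_ne_nil, ite_false, bAux_cons]
          split_ifs <;> first
            | rfl
            | (exfalso; push_cast at *; omega)
              | (push_cast; ring_nf)
      | false =>
        have hbig0 : big = 0 := by
          have h1 : ¬ (0 < big) := fun h => by simpa using hon.mpr h
          omega
        subst hbig0
        have hA : fingALoop ('-' :: cs) i pos r 0 false =
            fingALoop cs (i + 1) pos r 0 false := by
          simp [fingALoop]
        rw [hA, ih p' rest' (i + 1) pos r 0 false hsplit' (by simp) le_rfl hr]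
        simp only [List.count_nil, List.length_nil, List.cons_ne_nil, ite_false, bAux_cons]
        split_ifs <;> first
          | rfl
          | (exfalso; push_cast at *; omega)
          | (push_cast; ring_nf)
    · -- non-separator: the pending part grows by c
      rw [if_neg (by simp [hc])] at hsplit
      rw [List.splitOn] at hsplit'
      rw [hsplit'] at hsplit
      simp only [List.modifyHead] at hsplit
      obtain ⟨hp, hrest⟩ := List.cons.inj hsplit
      subst hp; subst hrest
      by_cases hplus : c = '+'
      · -- '+' : consBig grows, on := True (first or second branch of A, same effect)
        subst hplus
        have key := ih p' rest' (i + 1) pos r (big + 1) true hsplit'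
          (by refine ⟨fun _ => by omega, fun _ => rfl⟩) (by omega) hr
        have hA : fingALoop ('+' :: cs) i pos r big on =
            fingALoop cs (i + 1) pos r (big + 1) true := by
          cases on <;> simp [fingALoop]
        rw [hA, key]
        simp only [List.count_cons_self, List.length_cons]
        split_ifs <;> first
          | rfl
          | (exfalso; push_cast at *; omega)
          | (push_cast; ring_nf)
      · -- neither '+' nor '-': A's state is untouched
        have key := ih p' rest' (i + 1) pos r big on hsplit' hon hbig hr
        have hA : fingALoop (c :: cs) i pos r big on =
            fingALoop cs (i + 1) pos r big on := by
          cases on <;> simp [fingALoop, hplus, hc]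
        rw [hA, key]
        have hcnt : ((c :: p').count '+') = p'.count '+' := by
          simp [hplus]
        simp only [hcnt, List.length_cons]
        split_ifs <;> first
          | rfl
          | (exfalso; push_cast at *; omega)
          | (push_cast; ring_nf)

-- ===== VERDICT (by name: the statement is the Claim_ definition above) =====
theorem fingConsPos_spec : Claim_equal_fingConsPos := by
  intro myStr _
  unfold Spec_fingConsPos fingConsPos fingConsPos_alt
  rw [fold_eq_bAux]
  obtain ⟨p, rest, hsplit⟩ :
      ∃ p rest, List.splitOn '-' myStr.toList = p :: rest := by
    rcases h : List.splitOn '-' myStr.toList with _ | ⟨p, rest⟩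
    · exact absurd h (List.splitOnP_ne_nil _ _)
    · exact ⟨p, rest, rfl⟩
  rw [fingA_eq_bAux myStr.toList p rest 0 (-1) 0 0 false hsplit (by simp) le_rfl le_rfl,
      hsplit, bAux_cons]
  split_ifs <;> first
    | rfl
    | (exfalso; push_cast at *; omega)
    | (push_cast; ring_nf)
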